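-- pv_equiv track=rewrite | github.com/13th-LikeLion-Hackathon-LocalLinker/AI-Services | etl/text_chunker.py | _find_page_range_for_chunk
-- ===== SOURCE A (Python) =====
-- from typing import List, Dict, Any, Optional
--
-- def _find_page_range_for_chunk(full_text: str, start_char: int, end_char: int, text_content: List[str]) -> Dict[str, int]:
--     """
--     청크가 속한 페이지 범위 찾기
--
--     Args:
--         full_text: 전체 텍스트
--         start_char: 청크 시작 문자 위치
--         end_char: 청크 끝 문자 위치
--         text_content: 페이지별 텍스트 리스트
--
--     Returns:
--         페이지 범위 정보
--     """
--     # 각 페이지의 시작 위치 계산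
--     page_positions = []
--     current_pos = 0
--
--     for page_text in text_content:
--         page_positions.append(current_pos)
--         current_pos += len(page_text) + 1  # +1 for newline
--
--     # 시작 페이지 찾기
--     start_page = 1
--     for i, pos in enumerate(page_positions):
--         if pos <= start_char:
--             start_page = i + 1
--         else:
--             break
--
--     # 끝 페이지 찾기
--     end_page = start_page
--     for i, pos in enumerate(page_positions):
--         if pos <= end_char:
--             end_page = i + 1
--         else:
--             break
--
--     return {
--         'start_page': start_page,
--         'end_page': end_page
--     }
-- ===== SOURCE B (Python) =====
-- def _find_page_range_for_chunk(full_text, start_char, end_char, text_content):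
--     # Prefix page-start positions, then locate pages by binary search instead
--     # of two linear break-loops.
--     positions = []
--     cur = 0
--     for page_text in text_content:
--         positions.append(cur)
--         cur += len(page_text) + 1
--
--     def bisect_right(a, x):
--         lo, hi = 0, len(a)
--         while lo < hi:
--             mid = (lo + hi) // 2
--             if a[mid] <= x:
--                 lo = mid + 1
--             else:
--                 hi = mid
--         return lo
--
--     s = bisect_right(positions, start_char)
--     start_page = s if s >= 1 else 1
--     e = bisect_right(positions, end_char)
--     end_page = e if e >= 1 else start_page
--     return {'start_page': start_page, 'end_page': end_page}
-- ===== Notes on version B (the rewrite author's own statement) =====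
-- stated objective: alternative
-- what changed: The two linear scan-with-break loops over page_positions are replaced by a hand-written bisect_right binary search (with A's fallback sentinels start->1, end->start kept as conditional expressions).
import Mathlib
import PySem

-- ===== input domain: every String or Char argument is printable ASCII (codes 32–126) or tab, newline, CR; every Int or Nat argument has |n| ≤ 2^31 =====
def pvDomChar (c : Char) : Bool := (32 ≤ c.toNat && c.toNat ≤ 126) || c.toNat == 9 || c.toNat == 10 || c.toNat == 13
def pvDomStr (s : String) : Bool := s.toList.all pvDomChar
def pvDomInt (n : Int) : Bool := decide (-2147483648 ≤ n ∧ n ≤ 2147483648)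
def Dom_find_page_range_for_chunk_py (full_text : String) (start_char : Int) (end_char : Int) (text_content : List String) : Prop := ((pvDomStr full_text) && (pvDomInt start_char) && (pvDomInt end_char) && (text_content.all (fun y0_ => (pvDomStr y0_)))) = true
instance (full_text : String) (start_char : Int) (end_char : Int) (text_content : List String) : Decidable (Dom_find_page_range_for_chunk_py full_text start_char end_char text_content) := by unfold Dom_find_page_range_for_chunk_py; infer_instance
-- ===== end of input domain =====

-- B replaces A's two linear scan-with-break loops over page_positions by a
-- bisect_right binary search; same return value everywhere (equivalence proved below).

-- ===== PORT A =====
-- the page_positions-building loop (identical in A and in B's Python)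
def pvBuildPositions (text_content : List String) : List Int :=
  (text_content.foldl
    (fun (st : List Int × Int) page_text => (st.1 ++ [st.2], st.2 + PySem.Str.len page_text + 1))
    ([], 0)).1

-- A's 'for i, pos in enumerate(page_positions): if pos <= c: v = i+1 else: break'
def pvLoopA (c : Int) : List Int → Int → Int → Int
  | [], _, acc => acc
  | pos :: rest, i, acc => if pos ≤ c then pvLoopA c rest (i + 1) (i + 1) else acc

def find_page_range_for_chunk_py (full_text : String) (start_char : Int) (end_char : Int) (text_content : List String) : List (String × Int) :=
  let page_positions := pvBuildPositions text_content
  let start_page := pvLoopA start_char page_positions 0 1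
  let end_page := pvLoopA end_char page_positions 0 start_page
  [("start_page", start_page), ("end_page", end_page)]

-- ===== PORT B =====
-- Source B's hand-written bisect_right (the stdlib algorithm) is PySem.List.bisectRight
def find_page_range_for_chunk_py_alt (full_text : String) (start_char : Int) (end_char : Int) (text_content : List String) : List (String × Int) :=
  let positions := pvBuildPositions text_content
  let s := PySem.List.bisectRight positions start_char
  let start_page : Int := if (s : Int) ≥ 1 then (s : Int) else 1
  let e := PySem.List.bisectRight positions end_char
  let end_page : Int := if (e : Int) ≥ 1 then (e : Int) else start_page
  [("start_page", start_page), ("end_page", end_page)]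

-- ===== PRECONDITION & SPEC =====
def Spec_find_page_range_for_chunk_py (full_text : String) (start_char : Int) (end_char : Int) (text_content : List String) (out : List (String × Int)) : Prop := out = find_page_range_for_chunk_py_alt full_text start_char end_char text_content
instance (full_text : String) (start_char : Int) (end_char : Int) (text_content : List String) (out : List (String × Int)) : Decidable (Spec_find_page_range_for_chunk_py full_text start_char end_char text_content out) := by unfold Spec_find_page_range_for_chunk_py; infer_instance

-- ===== CLAIM (what is proved, stated in full; the proofs are below) =====
def Claim_equal_find_page_range_for_chunk_py : Prop := ∀ (full_text : String) (start_char : Int) (end_char : Int) (text_content : List String), Dom_find_page_range_for_chunk_py full_text start_char end_char text_content → Spec_find_page_range_for_chunk_py full_text start_char end_char text_content (find_page_range_for_chunk_py full_text start_char end_char text_content)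

-- ===== LEMMAS AND PROOFS =====

-- proof-side view of the positions list
def pvGen : List String → Int → List Int
  | [], _ => []
  | p :: rest, cur => cur :: pvGen rest (cur + PySem.Str.len p + 1)

lemma pvBuild_fst (ts : List String) (acc : List Int) (cur : Int) :
    (ts.foldl
      (fun (st : List Int × Int) page_text => (st.1 ++ [st.2], st.2 + PySem.Str.len page_text + 1))
      (acc, cur)).1 = acc ++ pvGen ts cur := by
  induction ts generalizing acc cur with
  | nil => simp [pvGen]
  | cons p rest ih =>
    simp only [List.foldl, pvGen]
    rw [ih]; simp

lemma pvGen_lb (ts : List String) (cur : Int) : ∀ p ∈ pvGen ts cur, cur ≤ p := by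
  induction ts generalizing cur with
  | nil => simp [pvGen]
  | cons q rest ih =>
    intro p hp
    simp only [pvGen, List.mem_cons] at hp
    rcases hp with rfl | hp
    · exact le_refl _
    · have h := ih (cur + PySem.Str.len q + 1) p hp
      have : (0:Int) ≤ PySem.Str.len q := by simp [PySem.Str.len_eq]
      omega

lemma pvGen_pairwise (ts : List String) (cur : Int) : (pvGen ts cur).Pairwise (· < ·) := by
  induction ts generalizing cur with
  | nil => simp [pvGen]
  | cons q rest ih =>
    simp only [pvGen, List.pairwise_cons]
    refine ⟨fun p hp => ?_, ih _⟩
    have h := pvGen_lb rest (cur + PySem.Str.len q + 1) p hp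
    have : (0:Int) ≤ PySem.Str.len q := by simp [PySem.Str.len_eq]
    omega

lemma pvPositions_pairwise (ts : List String) : (pvBuildPositions ts).Pairwise (· ≤ ·) := by
  unfold pvBuildPositions
  rw [pvBuild_fst]
  simp only [List.nil_append]
  exact (pvGen_pairwise ts 0).imp (fun h => le_of_lt h)

-- A's scan-with-break loop computes the same page number as any r with the
-- "first r positions are ≤ c, the rest are > c" characterisation
lemma pvLoopA_eq (c : Int) (l : List Int) (r : Nat) (hr : r ≤ l.length)
    (h1 : ∀ (j : Nat) (hj : j < l.length), j < r → l[j] ≤ c)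
    (h2 : ∀ (j : Nat) (hj : j < l.length), r ≤ j → c < l[j]) (i acc : Int) :
    pvLoopA c l i acc = if r = 0 then acc else i + r := by
  induction l generalizing r i acc with
  | nil =>
    have : r = 0 := by simpa using hr
    simp [pvLoopA, this]
  | cons p t ih =>
    cases r with
    | zero =>
      have hp : c < p := h2 0 (by simp) (Nat.zero_le 0)
      simp [pvLoopA, not_le.mpr hp]
    | succ r' =>
      have hp : p ≤ c := h1 0 (by simp) (Nat.succ_pos r')
      have hres := ih r' (by simpa using hr)
        (fun j hj hjr => by
          have := h1 (j+1) (by simpa using Nat.succ_lt_succ hj) (Nat.succ_lt_succ hjr)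
          simpa using this)
        (fun j hj hjr => by
          have := h2 (j+1) (by simpa using Nat.succ_lt_succ hj) (Nat.succ_le_succ hjr)
          simpa using this)
        (i + 1) (i + 1)
      simp only [pvLoopA, if_pos hp, hres]
      cases r' with
      | zero => simp
      | succ k => push_cast; ring

-- ===== VERDICT (by name: the statement is the Claim_ definition above) =====
theorem find_page_range_for_chunk_py_spec : Claim_equal_find_page_range_for_chunk_py := by
  intro full_text start_char end_char text_content _hdom
  unfold Spec_find_page_range_for_chunk_py
  unfold find_page_range_for_chunk_py find_page_range_for_chunk_py_alt
  simp only []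
  set P := pvBuildPositions text_content with hP
  have hsorted := pvPositions_pairwise text_content
  rw [← hP] at hsorted
  obtain ⟨hsr, hs1, hs2⟩ := PySem.List.bisectRight_spec P start_char hsorted
  obtain ⟨her, he1, he2⟩ := PySem.List.bisectRight_spec P end_char hsorted
  set rs := PySem.List.bisectRight P start_char with hrs
  set re := PySem.List.bisectRight P end_char with hre
  rw [pvLoopA_eq start_char P rs hsr hs1 hs2 0 1]
  rw [pvLoopA_eq end_char P re her he1 he2 0 _]
  rcases Nat.eq_zero_or_pos rs with h0 | hpos <;>
    rcases Nat.eq_zero_or_pos re with h0' | hpos' <;>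
      simp_all <;> omega
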